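-- pv_equiv track=rewrite | github.com/voliroo/Uni-python-project | Custom-String-Methods/python_manual_str.py | ye_isupper
-- ===== SOURCE A (Python) =====
-- def ye_isupper(s):
--     has_cased = False
--     for ch in s :
--         ascii_code = ord(ch)
--         if(97 <= ascii_code <= 122):
--             return False
--         if(65 <= ascii_code <=90):
--             has_cased = True
--     return has_cased
-- ===== SOURCE B (Python) =====
-- def ye_isupper(s):
--     if any(97 <= ord(c) <= 122 for c in s):
--         return False
--     return any(65 <= ord(c) <= 90 for c in s)
-- ===== Notes on version B (the rewrite author's own statement) =====
-- stated objective: idiomatic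
-- what changed: Replaced the single flag-tracking loop with two sequential short-circuiting any() scans: first reject on any lowercase letter, then report whether any uppercase letter exists.
import Mathlib
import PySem

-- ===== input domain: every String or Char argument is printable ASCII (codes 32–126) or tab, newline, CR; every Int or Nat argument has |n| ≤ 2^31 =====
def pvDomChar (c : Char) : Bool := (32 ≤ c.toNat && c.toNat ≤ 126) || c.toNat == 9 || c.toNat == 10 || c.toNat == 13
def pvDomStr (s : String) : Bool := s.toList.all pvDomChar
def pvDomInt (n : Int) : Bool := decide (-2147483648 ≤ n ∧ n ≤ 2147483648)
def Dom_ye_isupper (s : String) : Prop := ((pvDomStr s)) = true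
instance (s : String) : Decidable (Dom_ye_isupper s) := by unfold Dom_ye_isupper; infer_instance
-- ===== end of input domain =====

-- B restructures A's single flag-tracking loop into two sequential short-circuiting scans (no speed claim).
-- ===== PORT A =====
-- loop over the characters keeping the has_cased flag; early return False on a lowercase letter
def yeLoop : List Char → Bool → Bool
  | [], hasCased => hasCased
  | ch :: rest, hasCased =>
    if 97 ≤ ch.toNat ∧ ch.toNat ≤ 122 then false
    else if 65 ≤ ch.toNat ∧ ch.toNat ≤ 90 then yeLoop rest true
    else yeLoop rest hasCased

def ye_isupper (s : String) : Bool := yeLoop s.toList false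

-- ===== PORT B =====
def ye_isupper_alt (s : String) : Bool :=
  if s.toList.any (fun c => decide (97 ≤ c.toNat ∧ c.toNat ≤ 122)) then false
  else s.toList.any (fun c => decide (65 ≤ c.toNat ∧ c.toNat ≤ 90))

-- ===== PRECONDITION & SPEC =====
def Spec_ye_isupper (s : String) (out : Bool) : Prop := out = ye_isupper_alt s
instance (s : String) (out : Bool) : Decidable (Spec_ye_isupper s out) := by unfold Spec_ye_isupper; infer_instance

-- ===== CLAIM (what is proved, stated in full; the proofs are below) =====
def Claim_equal_ye_isupper : Prop := ∀ (s : String), Dom_ye_isupper s → Spec_ye_isupper s (ye_isupper s)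

-- ===== LEMMAS AND PROOFS =====

-- ===== VERDICT (by name: the statement is the Claim_ definition above) =====
theorem yeLoop_eq (l : List Char) (b : Bool) :
    yeLoop l b =
      (if l.any (fun c => decide (97 ≤ c.toNat ∧ c.toNat ≤ 122)) then false
       else (b || l.any (fun c => decide (65 ≤ c.toNat ∧ c.toNat ≤ 90)))) := by
  induction l generalizing b with
  | nil => simp [yeLoop]
  | cons c rest ih =>
    simp only [yeLoop, List.any_cons]
    by_cases h1 : 97 ≤ c.toNat ∧ c.toNat ≤ 122
    · simp [h1]
    · by_cases h2 : 65 ≤ c.toNat ∧ c.toNat ≤ 90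
      · simp [h1, h2, ih]
      · simp [h1, h2, ih]

theorem ye_isupper_spec : Claim_equal_ye_isupper := by
  intro s _
  unfold Spec_ye_isupper ye_isupper ye_isupper_alt
  rw [yeLoop_eq]
  simp
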